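-- pv_equiv track=rewrite | github.com/Sherll/ORChooser_python | programs/RecordClass.py | calculate
-- ===== SOURCE A (Python) =====
-- def isBasictype(chr):
--     if(chr == 'Z'):
--         result = "boolean"
--     elif(chr == 'B'):
--         result = "byte"
--     elif(chr == 'S'):
--         result = "short"
--     elif(chr == 'C'):
--         result = "char"
--     elif(chr == 'I'):
--         result = "int"
--     elif(chr == 'J'):
--         result = "long"
--     elif(chr == 'F'):
--         result = "float"
--     elif(chr == 'D'):
--         result = "double"
--     elif(chr == 'V'):
--         result = "void"
--     else:
--         result = None
--     return result
--
-- def calculate(Paratype):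
--     if(len(Paratype) == 0):
--         return 0
--     else:
--         sum = 0
--         lists = Paratype.split(',')
--         if(len(lists) == 1):
--             tmp = lists[0]
--             for chr in tmp:
--                 if(isBasictype(chr) != None):
--                     sum = sum + 1
--                 elif(chr == 'L'):
--                     sum = sum + 1
--                     break
--         else:
--             for list in lists:
--                 sum = sum + calculate(list)
--         return sum
-- ===== SOURCE B (Python) =====
-- def isBasictype(chr):
--     if(chr == 'Z'):
--         result = "boolean"
--     elif(chr == 'B'):
--         result = "byte"
--     elif(chr == 'S'):
--         result = "short"
--     elif(chr == 'C'):
--         result = "char"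
--     elif(chr == 'I'):
--         result = "int"
--     elif(chr == 'J'):
--         result = "long"
--     elif(chr == 'F'):
--         result = "float"
--     elif(chr == 'D'):
--         result = "double"
--     elif(chr == 'V'):
--         result = "void"
--     else:
--         result = None
--     return result
--
-- def calculate(Paratype):
--     # single pass over the characters: no split, no recursion; after an L
--     # we skip the rest of the current comma-separated segment
--     total = 0
--     skipping = False
--     for ch in Paratype:
--         if ch == ',':
--             skipping = False
--         elif not skipping:
--             if isBasictype(ch) is not None:
--                 total = total + 1
--             elif ch == 'L':
--                 total = total + 1
--                 skipping = True
--     return total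
-- ===== Notes on version B (the rewrite author's own statement) =====
-- stated objective: simpler
-- what changed: Replaced the split-then-recurse structure (split on ',', recurse on each piece, per-piece loop with break) by one flat pass over the characters with a skip flag that is reset at each comma, eliminating both the split and the recursion.
import Mathlib
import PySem

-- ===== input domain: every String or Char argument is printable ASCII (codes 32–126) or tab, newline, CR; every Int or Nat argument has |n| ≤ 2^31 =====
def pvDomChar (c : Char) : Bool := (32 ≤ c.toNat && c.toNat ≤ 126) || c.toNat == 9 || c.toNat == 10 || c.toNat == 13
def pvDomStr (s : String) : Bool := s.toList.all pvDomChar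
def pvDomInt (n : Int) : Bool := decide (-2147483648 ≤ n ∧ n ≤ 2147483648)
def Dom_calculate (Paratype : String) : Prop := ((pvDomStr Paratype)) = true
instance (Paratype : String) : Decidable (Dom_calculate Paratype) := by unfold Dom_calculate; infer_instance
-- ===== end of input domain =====

-- B replaces the split-on-','-then-recurse structure by one flat pass with a
-- skip-until-next-comma flag (objective: simpler; return value only, no mutation involved).

-- ===== PORT A =====

-- port of isBasictype (returns the type name, None → none)
def isBasictypeA (c : Char) : Option String :=
  if c = 'Z' then some "boolean"
  else if c = 'B' then some "byte"
  else if c = 'S' then some "short"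
  else if c = 'C' then some "char"
  else if c = 'I' then some "int"
  else if c = 'J' then some "long"
  else if c = 'F' then some "float"
  else if c = 'D' then some "double"
  else if c = 'V' then some "void"
  else none

-- A's inner `for chr in tmp` loop with its break (sum is the accumulator)
def innerA : List Char → Int → Int
  | [], s => s
  | c :: rest, s =>
    if isBasictypeA c ≠ none then innerA rest (s + 1)
    else if c = 'L' then s + 1
    else innerA rest s

-- reference shape of Python's str.split(',') used only to justify termination
-- of the recursive port (cited by name in decreasing_by) and in the proofs
def mySplit : List Char → List (List Char)
  | [] => [[]]
  | c :: rest =>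
    if c = ',' then [] :: mySplit rest
    else match mySplit rest with
      | [] => [[c]]
      | p :: ps => (c :: p) :: ps

theorem mySplit_ne_nil (cs : List Char) : mySplit cs ≠ [] := by
  induction cs with
  | nil => simp [mySplit]
  | cons c rest ih =>
    simp only [mySplit]
    split
    · simp
    · split
      · simp
      · simp

def consHead (x : List Char) : List (List Char) → List (List Char)
  | [] => [x]
  | p :: ps => (x ++ p) :: ps

theorem splitOn_go_comma (fuel : Nat) (l cur : List Char) (acc : List (List Char))
    (h : l.length < fuel) :
    PySem.Chars.splitOn.go [','] fuel l cur acc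
      = acc.reverse ++ consHead cur.reverse (mySplit l) := by
  induction fuel generalizing l cur acc with
  | zero => omega
  | succ f ih =>
    cases l with
    | nil =>
      simp [PySem.Chars.splitOn.go, mySplit, consHead]
    | cons c rest =>
      by_cases hc : c = ','
      · subst hc
        have hpre : [','].isPrefixOf (',' :: rest) = true := by
          simp [List.isPrefixOf]
        simp only [PySem.Chars.splitOn.go, hpre, if_pos, List.length_cons, List.drop_succ_cons,
          List.length_nil, List.drop_zero]
        rw [ih rest [] (cur.reverse :: acc) (by simpa using Nat.lt_of_succ_lt_succ h)]
        cases hms : mySplit rest with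
        | nil => exact absurd hms (mySplit_ne_nil rest)
        | cons p ps =>
          simp [mySplit, hms, consHead]
      · have hpre : [','].isPrefixOf (c :: rest) = false := by
          simp [List.isPrefixOf]
          intro h'; exact absurd h'.symm hc
        simp only [PySem.Chars.splitOn.go, hpre, Bool.false_eq_true, if_false]
        rw [ih rest (c :: cur) acc (by simpa using Nat.lt_of_succ_lt_succ h)]
        cases hms : mySplit rest with
        | nil => exact absurd hms (mySplit_ne_nil rest)
        | cons p ps =>
          simp [mySplit, hms, hc, consHead]

theorem splitOn_comma (cs : List Char) :
    PySem.Chars.splitOn cs [','] = mySplit cs := by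
  have := splitOn_go_comma (cs.length + 1) cs [] [] (by omega)
  simp only [PySem.Chars.splitOn, this]
  cases hms : mySplit cs with
  | nil => exact absurd hms (mySplit_ne_nil cs)
  | cons p ps => simp [consHead]

-- each piece, together with the other pieces, fits in the original string
theorem mem_mySplit_length (cs l : List Char) (hl : l ∈ mySplit cs) :
    l.length + ((mySplit cs).length - 1) ≤ cs.length := by
  induction cs generalizing l with
  | nil => simp [mySplit] at hl; simp [hl, mySplit]
  | cons c rest ih =>
    by_cases hc : c = ','
    · subst hc
      have hsplit : mySplit (',' :: rest) = [] :: mySplit rest := by simp [mySplit]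
      rw [hsplit] at hl ⊢
      have hlen : 1 ≤ (mySplit rest).length :=
        List.length_pos_of_ne_nil (mySplit_ne_nil rest)
      rcases List.mem_cons.mp hl with hl | hl
      · subst hl
        have h2 : (mySplit rest).length - 1 ≤ rest.length := by
          rcases (mySplit rest).eq_nil_or_concat with h | ⟨ys, y, hys⟩
          · exact absurd h (mySplit_ne_nil rest)
          · have := ih y (by simp [hys])
            simp [hys] at this ⊢
            omega
        simp only [List.length_cons, List.length_nil]
        omega
      · have := ih l hl
        simp only [List.length_cons]
        omega
    · cases hms : mySplit rest with
      | nil => exact absurd hms (mySplit_ne_nil rest)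
      | cons p ps =>
        have hsplit : mySplit (c :: rest) = (c :: p) :: ps := by
          simp [mySplit, hc, hms]
        rw [hsplit] at hl ⊢
        rcases List.mem_cons.mp hl with hl | hl
        · subst hl
          have := ih p (by simp [hms])
          simp [hms] at this
          simp only [List.length_cons]
          omega
        · have := ih l (by simp [hms, hl])
          simp [hms] at this
          simp only [List.length_cons]
          omega

-- port of calculate (the recursion of A over the comma-split pieces)
def calcAux (cs : List Char) : Int :=
  if cs.length = 0 then 0
  else
    let lists := PySem.Chars.splitOn cs [',']
    if lists.length = 1 then innerA (PySem.List.pyGetD lists 0 []) 0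
    else lists.attach.foldl (fun s l => s + calcAux l.1) 0
termination_by cs.length
decreasing_by
  rename_i h0 h1
  have hmem : l.1 ∈ mySplit cs := by
    have h := l.2
    simp only [show lists = PySem.Chars.splitOn cs [','] from rfl, splitOn_comma] at h
    exact h
  have h1' : ¬ (mySplit cs).length = 1 := by
    intro h; exact h1 (by rw [show lists = PySem.Chars.splitOn cs [','] from rfl, splitOn_comma]; exact h)
  have hlen : 1 ≤ (mySplit cs).length :=
    List.length_pos_of_ne_nil (mySplit_ne_nil cs)
  have := mem_mySplit_length cs l.1 hmem
  have h0' : cs.length ≠ 0 := h0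
  omega

def calculate (Paratype : String) : Int := calcAux Paratype.toList

-- ===== PORT B =====

-- B's single step: reset on ',', otherwise count unless skipping
def stepB (acc : Int × Bool) (c : Char) : Int × Bool :=
  if c = ',' then (acc.1, false)
  else if acc.2 then acc
  else if isBasictypeA c ≠ none then (acc.1 + 1, false)
  else if c = 'L' then (acc.1 + 1, true)
  else acc

def calculate_alt (Paratype : String) : Int :=
  (Paratype.toList.foldl stepB (0, false)).1

-- ===== PRECONDITION & SPEC =====
def Spec_calculate (Paratype : String) (out : Int) : Prop := out = calculate_alt Paratype
instance (Paratype : String) (out : Int) : Decidable (Spec_calculate Paratype out) := by unfold Spec_calculate; infer_instance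

-- ===== CLAIM (what is proved, stated in full; the proofs are below) =====
def Claim_equal_calculate : Prop := ∀ (Paratype : String), Dom_calculate Paratype → Spec_calculate Paratype (calculate Paratype)

-- ===== LEMMAS AND PROOFS =====

theorem innerA_shift (cs : List Char) (s : Int) : innerA cs s = s + innerA cs 0 := by
  induction cs generalizing s with
  | nil => simp [innerA]
  | cons c rest ih =>
    simp only [innerA]
    split
    · rw [ih (s + 1), ih (0 + 1)]; ring
    · split
      · ring
      · exact ih s

def pieceSum (cs : List Char) : Int := ((mySplit cs).map (fun p => innerA p 0)).sum

theorem mem_mySplit_no_comma (cs l : List Char) (hl : l ∈ mySplit cs) : ',' ∉ l := by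
  induction cs generalizing l with
  | nil => simp [mySplit] at hl; simp [hl]
  | cons c rest ih =>
    by_cases hc : c = ','
    · subst hc
      have hsplit : mySplit (',' :: rest) = [] :: mySplit rest := by simp [mySplit]
      rw [hsplit] at hl
      rcases List.mem_cons.mp hl with hl | hl
      · simp [hl]
      · exact ih l hl
    · cases hms : mySplit rest with
      | nil => exact absurd hms (mySplit_ne_nil rest)
      | cons p ps =>
        have hsplit : mySplit (c :: rest) = (c :: p) :: ps := by
          simp [mySplit, hc, hms]
        rw [hsplit] at hl
        rcases List.mem_cons.mp hl with hl | hl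
        · subst hl
          have hp := ih p (by simp [hms])
          intro hmem
          rcases List.mem_cons.mp hmem with h | h
          · exact hc h.symm
          · exact hp h
        · exact ih l (by simp [hms, hl])

theorem mySplit_no_comma (cs : List Char) (h : ',' ∉ cs) : mySplit cs = [cs] := by
  induction cs with
  | nil => simp [mySplit]
  | cons c rest ih =>
    have hc : c ≠ ',' := by intro hh; exact h (by simp [hh])
    have hr : ',' ∉ rest := fun hh => h (by simp [hh])
    simp [mySplit, hc, ih hr]

theorem mySplit_length_one (cs : List Char) (h : (mySplit cs).length = 1) :
    mySplit cs = [cs] := by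
  induction cs with
  | nil => simp [mySplit]
  | cons c rest ih =>
    by_cases hc : c = ','
    · subst hc
      have hsplit : mySplit (',' :: rest) = [] :: mySplit rest := by simp [mySplit]
      rw [hsplit] at h
      simp at h
      exact absurd h (mySplit_ne_nil rest)
    · cases hms : mySplit rest with
      | nil => exact absurd hms (mySplit_ne_nil rest)
      | cons p ps =>
        have hsplit : mySplit (c :: rest) = (c :: p) :: ps := by
          simp [mySplit, hc, hms]
        rw [hsplit] at h ⊢
        simp at h
        have hlen1 : (mySplit rest).length = 1 := by rw [hms, h]; rfl
        have hpr : p = rest := by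
          have := ih hlen1
          rw [hms, h] at this
          simpa using this
        simp [h, hpr]

-- joint invariant of B's fold against the per-piece sums of A
theorem foldB_inv (cs : List Char) (t : Int) :
    (cs.foldl stepB (t, false)).1 = t + pieceSum cs
    ∧ (cs.foldl stepB (t, true)).1 = t + ((mySplit cs).tail.map (fun p => innerA p 0)).sum := by
  induction cs generalizing t with
  | nil => simp [pieceSum, mySplit, innerA]
  | cons c rest ih =>
    by_cases hc : c = ','
    · subst hc
      have hs1 : stepB (t, false) ',' = (t, false) := by simp [stepB]
      have hs2 : stepB (t, true) ',' = (t, false) := by simp [stepB]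
      have hsplit : mySplit (',' :: rest) = [] :: mySplit rest := by simp [mySplit]
      constructor
      · rw [List.foldl_cons, hs1, (ih t).1]
        simp [pieceSum, hsplit, innerA]
      · rw [List.foldl_cons, hs2, (ih t).1]
        simp [pieceSum, hsplit]
    · cases hms : mySplit rest with
      | nil => exact absurd hms (mySplit_ne_nil rest)
      | cons p ps =>
        have hsplit : mySplit (c :: rest) = (c :: p) :: ps := by simp [mySplit, hc, hms]
        have htail : ∀ u : Int, (rest.foldl stepB (u, true)).1
            = u + (ps.map (fun q => innerA q 0)).sum := by
          intro u; have := (ih u).2; rw [hms] at this; simpa using this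
        have hpsum : pieceSum rest = innerA p 0 + (ps.map (fun q => innerA q 0)).sum := by
          simp [pieceSum, hms]
        constructor
        · by_cases hb : isBasictypeA c = none
          · by_cases hL : c = 'L'
            · subst hL
              have hstep : stepB (t, false) 'L' = (t + 1, true) := by
                simp [stepB, show isBasictypeA 'L' = none from by decide]
              rw [List.foldl_cons, hstep, htail (t + 1)]
              have hi : innerA ('L' :: p) 0 = 1 := by
                simp [innerA, show isBasictypeA 'L' = none from by decide]
              simp [pieceSum, hsplit, hi]
              ring
            · have hstep : stepB (t, false) c = (t, false) := by
                simp [stepB, hc, hb, hL]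
              rw [List.foldl_cons, hstep, (ih t).1, hpsum]
              have hi : innerA (c :: p) 0 = innerA p 0 := by
                simp [innerA, hb, hL]
              simp [pieceSum, hsplit, hi]
          · have hstep : stepB (t, false) c = (t + 1, false) := by
              simp [stepB, hc, hb]
            rw [List.foldl_cons, hstep, (ih (t + 1)).1, hpsum]
            have hi : innerA (c :: p) 0 = innerA p 1 := by
              simp [innerA, hb]
            rw [innerA_shift p 1] at hi
            simp [pieceSum, hsplit, hi]
            ring
        · have hstep : stepB (t, true) c = (t, true) := by
            simp [stepB, hc]
          rw [List.foldl_cons, hstep, htail t]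
          simp [hsplit]

theorem piece_pieceSum (l : List Char) (hl : ',' ∉ l) : pieceSum l = innerA l 0 := by
  simp [pieceSum, mySplit_no_comma l hl]

theorem calcAux_eq_pieceSum (cs : List Char) : calcAux cs = pieceSum cs := by
  induction cs using calcAux.induct with
  | case1 cs h0 => simp at h0; simp [calcAux, h0, pieceSum, mySplit, innerA]
  | case2 cs h0 lists hlen =>
    have h1 : (mySplit cs).length = 1 := by
      rw [← splitOn_comma]; exact hlen
    rw [calcAux, if_neg h0]
    simp only [splitOn_comma, if_pos h1]
    rw [mySplit_length_one cs h1]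
    simp only [pieceSum, mySplit_length_one cs h1]
    simp [PySem.List.pyGetD]
  | case3 cs h0 lists hlen ih =>
    have h1 : ¬ (mySplit cs).length = 1 := by
      rw [← splitOn_comma]; exact hlen
    rw [calcAux, if_neg h0]
    simp only [splitOn_comma]
    rw [if_neg h1]
    rw [List.foldl_attach (f := fun s l => s + calcAux l), splitOn_comma cs]
    rw [PySem.List.foldl_congr_mem (mySplit cs) (fun s l => s + calcAux l)
      (fun s l => s + innerA l 0) 0 ?_]
    · rw [PySem.List.foldl_add]
      simp [pieceSum]
    · intro acc l hl
      have h1' : calcAux l = pieceSum l :=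
        ih ⟨l, by show l ∈ PySem.Chars.splitOn cs [',']; rw [splitOn_comma cs]; exact hl⟩
      show acc + calcAux l = acc + innerA l 0
      rw [h1', piece_pieceSum l (mem_mySplit_no_comma cs l hl)]

-- ===== VERDICT (by name: the statement is the Claim_ definition above) =====
theorem calculate_spec : Claim_equal_calculate := by
  intro Paratype _
  unfold Spec_calculate calculate calculate_alt
  rw [calcAux_eq_pieceSum, (foldB_inv Paratype.toList 0).1]
  ring
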